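-- pv_equiv track=rewrite | github.com/rohansingh3593/full_env | src/itron.meter.pkg/itron/meter/MeterMan.py | splitWithQuotes
-- ===== SOURCE A (Python) =====
-- def splitWithQuotes(txt):
--     s = txt.split('\n')
--     res = []
--     cnt = 0
--     for item in s:
--         if res and cnt % 2 == 1:
--             res[-1] = res[-1] + '\n' + item
--         else:
--             res.append(item)
--             cnt = 0
--         cnt += item.count('"')
--     return res
-- ===== SOURCE B (Python) =====
-- def splitWithQuotes(txt):
--     # single pass over the characters: outside quotes a '\n' ends a segment,
--     # inside quotes it is kept; '"' toggles the quote state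
--     res = []
--     buf = []
--     in_quote = False
--     for ch in txt:
--         if ch == '\n' and not in_quote:
--             res.append(''.join(buf))
--             buf = []
--         else:
--             buf.append(ch)
--             if ch == '"':
--                 in_quote = not in_quote
--     res.append(''.join(buf))
--     return res
-- ===== Notes on version B (the rewrite author's own statement) =====
-- stated objective: simpler
-- what changed: B drops the split-into-lines-then-merge pass (which rebuilds the last segment by string re-concatenation) and instead scans the characters once, toggling an in-quote flag on each double-quote and committing the buffered segment at each unquoted newline.
import Mathlib
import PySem

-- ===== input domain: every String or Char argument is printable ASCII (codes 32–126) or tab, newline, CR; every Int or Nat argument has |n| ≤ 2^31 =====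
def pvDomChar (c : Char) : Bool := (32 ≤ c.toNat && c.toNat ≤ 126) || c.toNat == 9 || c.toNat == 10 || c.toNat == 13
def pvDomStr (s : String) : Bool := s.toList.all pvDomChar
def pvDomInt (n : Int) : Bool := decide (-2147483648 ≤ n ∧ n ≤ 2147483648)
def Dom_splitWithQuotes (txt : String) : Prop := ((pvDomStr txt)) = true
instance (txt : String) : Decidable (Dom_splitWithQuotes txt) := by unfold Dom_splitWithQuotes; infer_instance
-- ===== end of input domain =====

-- B replaces A's split-then-merge over the line list by a single character scan with an
-- in-quote flag and a current-segment buffer (objective: simpler one-pass decomposition; not claimed faster).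

-- ===== PORT A =====
-- the for-loop of A over the lines, with state (res, cnt); res[-1] assignment is
-- dropLast ++ [getLast! ++ …] (the guard `res` makes getLast! safe exactly as in Python)
def splitWithQuotesLoop : List (List Char) → List (List Char) → Int → List (List Char)
  | [], res, _ => res
  | item :: s, res, cnt =>
    if !res.isEmpty && (PySem.Int.mod cnt 2 == 1) then
      splitWithQuotesLoop s (res.dropLast ++ [res.getLast! ++ '\n' :: item])
        (cnt + (PySem.Chars.count item ['"'] : Int))
    else
      splitWithQuotesLoop s (res ++ [item]) (0 + (PySem.Chars.count item ['"'] : Int))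

def splitWithQuotes (txt : String) : List String :=
  (splitWithQuotesLoop (PySem.Chars.splitOn txt.toList ['\n']) [] 0).map String.ofList

-- ===== PORT B =====
-- B's single for-loop over the characters with state (res, buf, in_quote)
def splitWithQuotesAltGo : List Char → List Char → Bool → List (List Char) → List (List Char)
  | [], buf, _, res => res ++ [buf]
  | c :: t, buf, inq, res =>
    if c = '\n' && !inq then
      splitWithQuotesAltGo t [] inq (res ++ [buf])
    else
      splitWithQuotesAltGo t (buf ++ [c]) (if c = '"' then !inq else inq) res

def splitWithQuotes_alt (txt : String) : List String :=
  (splitWithQuotesAltGo txt.toList [] false []).map String.ofList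

-- ===== PRECONDITION & SPEC =====
def Spec_splitWithQuotes (txt : String) (out : List String) : Prop := out = splitWithQuotes_alt txt
instance (txt : String) (out : List String) : Decidable (Spec_splitWithQuotes txt out) := by unfold Spec_splitWithQuotes; infer_instance

-- ===== CLAIM (what is proved, stated in full; the proofs are below) =====
def Claim_equal_splitWithQuotes : Prop := ∀ (txt : String), Dom_splitWithQuotes txt → Spec_splitWithQuotes txt (splitWithQuotes txt)

-- ===== LEMMAS AND PROOFS =====

-- the line decomposition of a character list (structural form of split('\n'))
def pvSplit : List Char → List (List Char)
  | [] => [[]]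
  | c :: t =>
    if c = '\n' then [] :: pvSplit t
    else
      match pvSplit t with
      | [] => [[c]]          -- unreachable: pvSplit never returns []
      | h :: tl => (c :: h) :: tl

-- quote-parity toggle along a character list (the very step function B iterates)
def pvToggle (l : List Char) (b : Bool) : Bool :=
  l.foldl (fun b c => if c = '"' then !b else b) b

-- B at line granularity: first list element = remainder of the current physical line
def pvLineGo : List (List Char) → List Char → Bool → List (List Char) → List (List Char)
  | [], buf, _, res => res ++ [buf]
  | [l], buf, _, res => res ++ [buf ++ l]
  | l :: l₂ :: ls, buf, inq, res =>
    if pvToggle l inq then pvLineGo (l₂ :: ls) (buf ++ l ++ ['\n']) (pvToggle l inq) res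
    else pvLineGo (l₂ :: ls) [] false (res ++ [buf ++ l])

theorem pvSplit_ne_nil (cs : List Char) : pvSplit cs ≠ [] := by
  cases cs with
  | nil => simp [pvSplit]
  | cons c t =>
    simp only [pvSplit]
    split
    · simp
    · cases h : pvSplit t <;> simp

theorem pvCountGo_spec (fuel : Nat) (l : List Char) (acc : Nat) (h : l.length ≤ fuel) :
    PySem.Chars.count.go ['"'] fuel l acc = acc + l.count '"' := by
  induction l generalizing fuel acc with
  | nil => rw [PySem.Chars.count.go.eq_def]; cases fuel <;> simp
  | cons c t ih =>
    cases fuel with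
    | zero => simp at h
    | succ f =>
      rw [PySem.Chars.count.go.eq_def]
      simp only [List.length_cons] at h
      by_cases hc : c = '"'
      · have hpre : List.isPrefixOf ['"'] (c :: t) = true := by simp [List.isPrefixOf, hc]
        simp only [hpre, if_pos]
        simp only [List.length_singleton, List.drop_succ_cons, List.drop_zero]
        rw [ih f (acc + 1) (by omega)]
        simp [List.count_cons, hc]
        omega
      · have hpre : List.isPrefixOf ['"'] (c :: t) = false := by
          simp [List.isPrefixOf]
          intro hcc; exact absurd hcc.symm hc
        simp only [hpre, Bool.false_eq_true, if_false]
        rw [ih f acc (by omega)]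
        simp [List.count_cons, hc]

theorem pvCount_eq (l : List Char) : PySem.Chars.count l ['"'] = l.count '"' := by
  have : PySem.Chars.count l ['"'] = PySem.Chars.count.go ['"'] l.length l 0 := by
    simp [PySem.Chars.count]
  rw [this, pvCountGo_spec l.length l 0 (le_refl _)]
  omega

theorem pvSplitGo_spec (cs : List Char) (fuel : Nat) (cur : List Char)
    (acc : List (List Char)) (h : cs.length < fuel) :
    PySem.Chars.splitOn.go ['\n'] fuel cs cur acc =
      acc.reverse ++ (match pvSplit cs with
        | [] => [cur.reverse]
        | hd :: tl => (cur.reverse ++ hd) :: tl) := by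
  induction cs generalizing fuel cur acc with
  | nil =>
    cases fuel with
    | zero => omega
    | succ f => rw [PySem.Chars.splitOn.go.eq_def]; simp [pvSplit]
  | cons c t ih =>
    cases fuel with
    | zero => omega
    | succ f =>
      rw [PySem.Chars.splitOn.go.eq_def]
      simp only []
      by_cases hc : c = '\n'
      · have hpre : List.isPrefixOf ['\n'] (c :: t) = true := by
          simp [List.isPrefixOf, hc]
        rw [if_pos hpre]
        simp only [List.length_singleton, List.drop_one, List.tail_cons]
        rw [ih f [] (cur.reverse :: acc) (by simp at h; omega)]
        simp [pvSplit, hc]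
        cases hsp : pvSplit t with
        | nil => exact absurd hsp (pvSplit_ne_nil t)
        | cons hd tl => simp
      · have hpre : List.isPrefixOf ['\n'] (c :: t) = false := by
          simp [List.isPrefixOf]
          intro hcc; exact absurd hcc.symm hc
        rw [if_neg (by simp [hpre])]
        rw [ih f (c :: cur) acc (by simp at h ⊢; omega)]
        simp only [pvSplit, if_neg hc]
        cases hsp : pvSplit t with
        | nil => exact absurd hsp (pvSplit_ne_nil t)
        | cons hd tl => simp

theorem pvSplitOn_eq (cs : List Char) :
    PySem.Chars.splitOn cs ['\n'] = pvSplit cs := by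
  unfold PySem.Chars.splitOn
  rw [pvSplitGo_spec cs (cs.length + 1) [] [] (by omega)]
  cases hsp : pvSplit cs with
  | nil => exact absurd hsp (pvSplit_ne_nil cs)
  | cons hd tl => simp

-- B's char scan equals the line-granular scan over pvSplit
theorem pvAltGo_eq_lineGo (cs : List Char) (buf : List Char) (inq : Bool)
    (res : List (List Char)) :
    splitWithQuotesAltGo cs buf inq res = pvLineGo (pvSplit cs) buf inq res := by
  induction cs generalizing buf inq res with
  | nil => simp [splitWithQuotesAltGo, pvSplit, pvLineGo]
  | cons c t ih =>
    cases hsp : pvSplit t with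
    | nil => exact absurd hsp (pvSplit_ne_nil t)
    | cons h tl =>
      by_cases hc : c = '\n'
      · subst hc
        cases inq with
        | false =>
          rw [show splitWithQuotesAltGo ('\n' :: t) buf false res
                = splitWithQuotesAltGo t [] false (res ++ [buf]) from by
              simp [splitWithQuotesAltGo]]
          rw [ih, hsp]
          simp [pvSplit, hsp, pvLineGo, pvToggle]
        | true =>
          rw [show splitWithQuotesAltGo ('\n' :: t) buf true res
                = splitWithQuotesAltGo t (buf ++ ['\n']) true res from by
              simp [splitWithQuotesAltGo]]
          rw [ih, hsp]
          simp [pvSplit, hsp, pvLineGo, pvToggle]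
      · rw [show splitWithQuotesAltGo (c :: t) buf inq res
              = splitWithQuotesAltGo t (buf ++ [c]) (if c = '"' then !inq else inq) res from by
            simp [splitWithQuotesAltGo, hc]]
        rw [ih, hsp]
        have htog : pvToggle (c :: h) inq = pvToggle h (if c = '"' then !inq else inq) := by
          simp [pvToggle]
        cases tl with
        | nil => simp [pvSplit, hc, hsp, pvLineGo]
        | cons l₂ ls =>
          simp only [pvSplit, if_neg hc, hsp, pvLineGo, htog]
          split <;> simp

-- A's loop only depends on cnt through its parity
theorem pvLoop_parity (s : List (List Char)) (res : List (List Char)) (c₁ c₂ : Int)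
    (h : PySem.Int.mod c₁ 2 = PySem.Int.mod c₂ 2) :
    splitWithQuotesLoop s res c₁ = splitWithQuotesLoop s res c₂ := by
  induction s generalizing res c₁ c₂ with
  | nil => rfl
  | cons item t ih =>
    have e1 := PySem.Int.mod_eq_emod_of_pos (a := c₁) (b := 2) (by norm_num)
    have e2 := PySem.Int.mod_eq_emod_of_pos (a := c₂) (b := 2) (by norm_num)
    simp only [splitWithQuotesLoop, h, e1, e2] at *
    split
    · apply ih
      have f1 := PySem.Int.mod_eq_emod_of_pos (a := c₁ + ↑(PySem.Chars.count item ['"'])) (b := 2) (by norm_num)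
      have f2 := PySem.Int.mod_eq_emod_of_pos (a := c₂ + ↑(PySem.Chars.count item ['"'])) (b := 2) (by norm_num)
      rw [f1, f2]; omega
    · apply ih; rfl

-- parity of the toggle = parity of the quote count
theorem pvToggle_eq (l : List Char) (b : Bool) :
    pvToggle l b = (b ^^ decide (l.count '"' % 2 = 1)) := by
  induction l generalizing b with
  | nil => simp [pvToggle]
  | cons c t ih =>
    simp only [pvToggle, List.foldl_cons] at *
    rw [ih]
    by_cases hc : c = '"'
    · subst hc
      simp only [if_pos rfl, List.count_cons, if_pos rfl]
      have : (t.count '"' + 1) % 2 = 1 ↔ ¬ (t.count '"' % 2 = 1) := by omega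
      cases b <;> by_cases hp : t.count '"' % 2 = 1 <;> simp [hp, this]
    · simp [hc, List.count_cons]

-- the line-granular scan equals A's loop
theorem pvLineGo_eq_loop (ls : List (List Char)) (l : List Char) (buf : List Char)
    (b : Bool) (res : List (List Char)) :
    pvLineGo (l :: ls) (if b then buf ++ ['\n'] else []) b res =
      splitWithQuotesLoop (l :: ls) (if b then res ++ [buf] else res) (if b then 1 else 0) := by
  induction ls generalizing l buf b res with
  | nil =>
    cases b with
    | false =>
      simp only [reduceIte, pvLineGo, splitWithQuotesLoop]
      rw [if_neg (by simp [PySem.Int.mod])]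
      simp [splitWithQuotesLoop]
    | true =>
      simp only [reduceIte, pvLineGo, splitWithQuotesLoop]
      rw [if_pos (by simp [PySem.Int.mod])]
      simp [splitWithQuotesLoop]
  | cons l₂ ls' ih =>
    have hp : pvToggle l b = (b ^^ decide (l.count '"' % 2 = 1)) := pvToggle_eq l b
    have hcnt : (PySem.Chars.count l ['"'] : Int) = (l.count '"' : Int) := by
      rw [pvCount_eq]
    cases b with
    | false =>
      norm_num
      simp only [pvLineGo, hp, Bool.false_xor]
      have hstep : splitWithQuotesLoop (l :: l₂ :: ls') res 0 =
          splitWithQuotesLoop (l₂ :: ls') (res ++ [l]) (0 + (PySem.Chars.count l ['"'] : Int)) := by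
        simp only [splitWithQuotesLoop]
        rw [if_neg (by simp [PySem.Int.mod])]
      rw [hstep]
      rw [pvLoop_parity (l₂ :: ls') (res ++ [l])
            (0 + (PySem.Chars.count l ['"'] : Int))
            (if decide (l.count '"' % 2 = 1) then 1 else 0)
            (by
              rw [hcnt]
              rw [PySem.Int.mod_eq_emod_of_pos (by norm_num),
                  PySem.Int.mod_eq_emod_of_pos (by norm_num)]
              by_cases hq : l.count '"' % 2 = 1 <;> simp [hq] <;> omega)]
      by_cases hq : l.count '"' % 2 = 1
      · rw [if_pos (by simp [hq]), if_pos (by simp [hq])]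
        have := ih l₂ l true res
        simpa [hq] using this
      · rw [if_neg (by simp [hq]), if_neg (by simp [hq])]
        have := ih l₂ [] false (res ++ [l])
        simpa [hq] using this
    | true =>
      norm_num
      simp only [pvLineGo, hp, Bool.true_xor]
      have hstep : splitWithQuotesLoop (l :: l₂ :: ls') (res ++ [buf]) 1 =
          splitWithQuotesLoop (l₂ :: ls') (res ++ [buf ++ '\n' :: l])
            (1 + (PySem.Chars.count l ['"'] : Int)) := by
        simp only [splitWithQuotesLoop]
        rw [if_pos (by simp [PySem.Int.mod])]
        simp
      rw [hstep]
      rw [pvLoop_parity (l₂ :: ls') (res ++ [buf ++ '\n' :: l])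
            (1 + (PySem.Chars.count l ['"'] : Int))
            (if !decide (l.count '"' % 2 = 1) then 1 else 0)
            (by
              rw [hcnt]
              rw [PySem.Int.mod_eq_emod_of_pos (by norm_num),
                  PySem.Int.mod_eq_emod_of_pos (by norm_num)]
              by_cases hq : l.count '"' % 2 = 1 <;> simp [hq] <;> omega)]
      by_cases hq : l.count '"' % 2 = 1
      · rw [if_neg (by simp [hq]), if_neg (by simp [hq])]
        have := ih l₂ [] false (res ++ [buf ++ '\n' :: l])
        simpa [hq] using this
      · rw [if_pos (by simp [hq]), if_pos (by simp [hq])]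
        have := ih l₂ (buf ++ '\n' :: l) true res
        simpa [hq, List.append_assoc] using this

-- ===== VERDICT (by name: the statement is the Claim_ definition above) =====
theorem splitWithQuotes_spec : Claim_equal_splitWithQuotes := by
  intro txt _
  unfold Spec_splitWithQuotes splitWithQuotes splitWithQuotes_alt
  rw [pvSplitOn_eq, pvAltGo_eq_lineGo]
  cases hsp : pvSplit txt.toList with
  | nil => exact absurd hsp (pvSplit_ne_nil txt.toList)
  | cons l ls =>
    have := pvLineGo_eq_loop ls l [] false []
    norm_num at this
    rw [this]
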